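-- pv_equiv track=rewrite | github.com/NguyenTienDung21/calcRectsArea | layout_difcore_v2.py | segment_rect_list
-- ===== SOURCE A (Python) =====
-- def get_y1(rect):
--     _, y1, _, _ = rect
--     return y1
--
-- def get_y2(rect):
--     _, _, _, y2 = rect
--     return y2
--
-- def segment_rect_list(rects):
--     yset = set()
--     for rect in rects:
--         yset.add(get_y1(rect))
--         yset.add(get_y2(rect))
--     ylist = list(yset)
--     ylist.sort()
--     return ylist
-- ===== SOURCE B (Python) =====
-- def _merge_unique(xs, ys):
--     i = j = 0
--     out = []
--     while i < len(xs) and j < len(ys):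
--         if xs[i] < ys[j]:
--             out.append(xs[i]); i += 1
--         elif ys[j] < xs[i]:
--             out.append(ys[j]); j += 1
--         else:
--             out.append(xs[i]); i += 1; j += 1
--     out.extend(xs[i:])
--     out.extend(ys[j:])
--     return out
--
-- def _uniq_ys(rects):
--     if not rects:
--         return []
--     if len(rects) == 1:
--         y1, y2 = rects[0][1], rects[0][3]
--         if y1 < y2:
--             return [y1, y2]
--         if y2 < y1:
--             return [y2, y1]
--         return [y1]
--     mid = len(rects) // 2
--     return _merge_unique(_uniq_ys(rects[:mid]), _uniq_ys(rects[mid:]))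
--
-- def segment_rect_list(rects):
--     return _uniq_ys(rects)
-- ===== Notes on version B (the rewrite author's own statement) =====
-- stated objective: alternative
-- what changed: Replaces hash-set dedup plus library sort with a divide-and-conquer merge sort over the rectangles whose merge step itself collapses duplicates, so sortedness and uniqueness are maintained structurally at every merge.
import Mathlib
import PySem

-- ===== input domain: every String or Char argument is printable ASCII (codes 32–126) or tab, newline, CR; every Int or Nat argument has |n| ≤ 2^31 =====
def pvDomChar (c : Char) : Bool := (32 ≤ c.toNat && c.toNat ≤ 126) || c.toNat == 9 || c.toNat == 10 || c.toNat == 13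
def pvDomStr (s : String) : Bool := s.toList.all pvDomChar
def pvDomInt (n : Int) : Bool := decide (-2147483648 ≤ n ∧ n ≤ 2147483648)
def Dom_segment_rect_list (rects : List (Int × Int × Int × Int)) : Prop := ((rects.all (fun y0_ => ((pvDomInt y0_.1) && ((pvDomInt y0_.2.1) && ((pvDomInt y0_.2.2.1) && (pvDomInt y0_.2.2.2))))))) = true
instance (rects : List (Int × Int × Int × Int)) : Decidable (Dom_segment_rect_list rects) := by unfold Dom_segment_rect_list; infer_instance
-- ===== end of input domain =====

-- B replaces A's hash-set dedup plus library sort by a divide-and-conquer merge sort over the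
-- rectangles whose merge step collapses duplicates (objective: alternative algorithm, same cost).

-- ===== PORT A =====
def get_y1 (rect : Int × Int × Int × Int) : Int := rect.2.1

def get_y2 (rect : Int × Int × Int × Int) : Int := rect.2.2.2

def segment_rect_list (rects : List (Int × Int × Int × Int)) : List Int :=
  let yset : PySem.Set Int :=
    rects.foldl (fun yset rect => PySem.Set.add (PySem.Set.add yset (get_y1 rect)) (get_y2 rect))
      PySem.Set.empty
  -- list(yset) then .sort(): sorting consumes the set order-independently
  PySem.List.sorted yset (fun x => x) false

-- ===== PORT B =====
-- Source B's _merge_unique two-pointer while loop, as the obvious recursion on the two remaining suffixes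
def mergeUnique : List Int → List Int → List Int
  | [], ys => ys
  | x :: xs, [] => x :: xs
  | x :: xs, y :: ys =>
    if x < y then x :: mergeUnique xs (y :: ys)
    else if y < x then y :: mergeUnique (x :: xs) ys
    else x :: mergeUnique xs ys

-- Source B's _uniq_ys: split at len//2, recurse, merge
def uniqYs (rects : List (Int × Int × Int × Int)) : List Int :=
  match rects with
  | [] => []
  | [r] =>
    let y1 := r.2.1
    let y2 := r.2.2.2
    if y1 < y2 then [y1, y2] else if y2 < y1 then [y2, y1] else [y1]
  | r1 :: r2 :: rest =>
    let l := r1 :: r2 :: rest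
    let mid := l.length / 2
    mergeUnique (uniqYs (l.take mid)) (uniqYs (l.drop mid))
termination_by rects.length
decreasing_by
  · simp [List.length_take]; omega
  · simp; omega

def segment_rect_list_alt (rects : List (Int × Int × Int × Int)) : List Int :=
  uniqYs rects

-- ===== PRECONDITION & SPEC =====
def Spec_segment_rect_list (rects : List (Int × Int × Int × Int)) (out : List Int) : Prop := out = segment_rect_list_alt rects
instance (rects : List (Int × Int × Int × Int)) (out : List Int) : Decidable (Spec_segment_rect_list rects out) := by unfold Spec_segment_rect_list; infer_instance

-- ===== CLAIM (what is proved, stated in full; the proofs are below) =====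
def Claim_equal_segment_rect_list : Prop := ∀ (rects : List (Int × Int × Int × Int)), Dom_segment_rect_list rects → Spec_segment_rect_list rects (segment_rect_list rects)

-- ===== LEMMAS AND PROOFS =====

-- membership in mergeUnique is the union of the memberships
theorem mem_mergeUnique (xs ys : List Int) (a : Int) :
    a ∈ mergeUnique xs ys ↔ a ∈ xs ∨ a ∈ ys := by
  fun_induction mergeUnique xs ys with
  | case1 ys => simp
  | case2 x xs => simp
  | case3 x xs y ys h ih => simp [ih]; tauto
  | case4 x xs y ys h1 h2 ih => simp [ih]; tauto
  | case5 x xs y ys h1 h2 ih =>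
    have hxy : x = y := by omega
    subst hxy
    simp [ih]; tauto

-- mergeUnique of two strictly increasing lists is strictly increasing
theorem pairwise_mergeUnique (xs ys : List Int)
    (hx : xs.Pairwise (· < ·)) (hy : ys.Pairwise (· < ·)) :
    (mergeUnique xs ys).Pairwise (· < ·) := by
  fun_induction mergeUnique xs ys with
  | case1 ys => exact hy
  | case2 x xs => exact hx
  | case3 x xs y ys h ih =>
    refine List.pairwise_cons.mpr ⟨?_, ih (List.pairwise_cons.mp hx).2 hy⟩
    intro z hz
    rcases (mem_mergeUnique _ _ z).mp hz with hz | hz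
    · exact (List.pairwise_cons.mp hx).1 z hz
    · rcases List.mem_cons.mp hz with rfl | hz
      · exact h
      · exact lt_trans h ((List.pairwise_cons.mp hy).1 z hz)
  | case4 x xs y ys h1 h2 ih =>
    refine List.pairwise_cons.mpr ⟨?_, ih hx (List.pairwise_cons.mp hy).2⟩
    intro z hz
    rcases (mem_mergeUnique _ _ z).mp hz with hz | hz
    · rcases List.mem_cons.mp hz with rfl | hz
      · exact h2
      · exact lt_trans h2 ((List.pairwise_cons.mp hx).1 z hz)
    · exact (List.pairwise_cons.mp hy).1 z hz
  | case5 x xs y ys h1 h2 ih =>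
    have hxy : x = y := by omega
    subst hxy
    refine List.pairwise_cons.mpr ⟨?_, ih (List.pairwise_cons.mp hx).2 (List.pairwise_cons.mp hy).2⟩
    intro z hz
    rcases (mem_mergeUnique _ _ z).mp hz with hz | hz
    · exact (List.pairwise_cons.mp hx).1 z hz
    · exact (List.pairwise_cons.mp hy).1 z hz

-- the y-multiset of a rect list
def yFlat (rects : List (Int × Int × Int × Int)) : List Int :=
  rects.flatMap (fun r => [r.2.1, r.2.2.2])

-- uniqYs is strictly increasing and carries exactly the y-coordinates
theorem uniqYs_sorted_mem (rects : List (Int × Int × Int × Int)) :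
    (uniqYs rects).Pairwise (· < ·) ∧ ∀ a, (a ∈ uniqYs rects ↔ a ∈ yFlat rects) := by
  fun_induction uniqYs rects with
  | case1 => simp [yFlat]
  | case2 r h1 => simp [yFlat]; constructor <;> [omega; tauto]
  | case3 r h1 h2 => simp [yFlat]; constructor <;> [omega; tauto]
  | case4 r h1 h2 =>
    have he : r.2.1 = r.2.2.2 := by omega
    simp [yFlat, he]; tauto
  | case5 r1 r2 rest l mid ih1 ih2 =>
    refine ⟨pairwise_mergeUnique _ _ ih1.1 ih2.1, ?_⟩
    intro a
    rw [mem_mergeUnique, ih1.2 a, ih2.2 a]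
    have hsplit : yFlat ((r1 :: r2 :: rest).take ((r1 :: r2 :: rest).length / 2))
        ++ yFlat ((r1 :: r2 :: rest).drop ((r1 :: r2 :: rest).length / 2))
        = yFlat (r1 :: r2 :: rest) := by
      unfold yFlat
      rw [← List.flatMap_append, List.take_append_drop]
    rw [← hsplit, List.mem_append]

-- A's set-building loop over rects = Set.ofList of the flat y-list
theorem foldA_eq (rects : List (Int × Int × Int × Int)) (s : PySem.Set Int) :
    rects.foldl (fun yset rect => PySem.Set.add (PySem.Set.add yset (get_y1 rect)) (get_y2 rect)) s
      = (yFlat rects).foldl PySem.Set.add s := by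
  induction rects generalizing s with
  | nil => simp [yFlat]
  | cons r t ih =>
    simp only [List.foldl_cons, yFlat, List.flatMap_cons, List.foldl_append, get_y1, get_y2]
    exact ih _

-- the two ports agree
theorem ports_agree (rects : List (Int × Int × Int × Int)) :
    segment_rect_list rects = segment_rect_list_alt rects := by
  unfold segment_rect_list segment_rect_list_alt
  have hset : rects.foldl
      (fun yset rect => PySem.Set.add (PySem.Set.add yset (get_y1 rect)) (get_y2 rect))
      PySem.Set.empty = PySem.Set.ofList (yFlat rects) := by
    rw [foldA_eq, PySem.Set.ofList_eq_foldl]; rfl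
  simp only [hset]
  obtain ⟨hpair, hmem⟩ := uniqYs_sorted_mem rects
  refine PySem.List.sorted_eq_of_perm_of_pairwise_lt _ _ (fun x => x) ?_ hpair
  refine (List.perm_ext_iff_of_nodup (hpair.imp ne_of_lt) (PySem.Set.nodup_ofList _)).mpr ?_
  intro a
  rw [hmem a, PySem.Set.mem_ofList]

-- ===== VERDICT (by name: the statement is the Claim_ definition above) =====
theorem segment_rect_list_spec : Claim_equal_segment_rect_list := by
  intro rects _
  exact ports_agree rects
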